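-- pv_equiv track=rewrite | github.com/microsoft/dpu-utils | python/dpu_utils/codeutils/identifiersplitting.py | split_camelcase
-- ===== SOURCE A (Python) =====
-- from typing import List
--
-- def split_camelcase(camel_case_identifier: str) -> List[str]:
--     """
--     Split camelCase identifiers.
--     """
--     if not len(camel_case_identifier):
--         return []
--
--     # split into words based on adjacent cases being the same
--     result = []
--     current = str(camel_case_identifier[0])
--     prev_upper = camel_case_identifier[0].isupper()
--     prev_digit = camel_case_identifier[0].isdigit()
--     prev_special = not camel_case_identifier[0].isalnum()
--     for c in camel_case_identifier[1:]:
--         upper = c.isupper()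
--         digit = c.isdigit()
--         special = not c.isalnum()
--         new_upper_word = upper and not prev_upper
--         new_digit_word = digit and not prev_digit
--         new_special_word = special and not prev_special
--         if new_digit_word or new_upper_word or new_special_word:
--             result.append(current)
--             current = c
--         elif not upper and prev_upper and len(current) > 1:
--             result.append(current[:-1])
--             current = current[-1] + c
--         elif not digit and prev_digit:
--             result.append(current)
--             current = c
--         elif not special and prev_special:
--             result.append(current)
--             current = c
--         else:
--             current += c
--         prev_digit = digit
--         prev_upper = upper
--         prev_special = special
--     result.append(current)
--     return result
-- ===== SOURCE B (Python) =====
-- from typing import List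
--
--
-- def _category(c: str) -> int:
--     if c.isupper():
--         return 0
--     if c.isdigit():
--         return 1
--     if not c.isalnum():
--         return 2
--     return 3  # lowercase / other alnum
--
--
-- def split_camelcase(camel_case_identifier: str) -> List[str]:
--     """
--     Split camelCase identifiers.
--     """
--     # Pass 1: maximal runs of same-category characters.
--     runs: List[tuple] = []
--     for c in camel_case_identifier:
--         cat = _category(c)
--         if runs and runs[-1][0] == cat:
--             runs[-1] = (cat, runs[-1][1] + c)
--         else:
--             runs.append((cat, c))
--     # Pass 2: emit tokens; an uppercase run directly before a lower run
--     # merges (length 1) or donates its last character (length > 1).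
--     result: List[str] = []
--     i = 0
--     while i < len(runs):
--         cat, text = runs[i]
--         if cat == 0 and i + 1 < len(runs) and runs[i + 1][0] == 3:
--             low = runs[i + 1][1]
--             if len(text) == 1:
--                 result.append(text + low)
--             else:
--                 result.append(text[:-1])
--                 result.append(text[-1] + low)
--             i += 2
--         else:
--             result.append(text)
--             i += 1
--     return result
-- ===== Notes on version B (the rewrite author's own statement) =====
-- stated objective: alternative
-- what changed: Replaced A's single-pass automaton over (prev_upper, prev_digit, prev_special) flags by a two-pass algorithm: first group the string into maximal same-category runs (upper/digit/special/lower), then emit tokens from the run list, merging or peeling an uppercase run that precedes a lowercase run.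
import Mathlib
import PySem

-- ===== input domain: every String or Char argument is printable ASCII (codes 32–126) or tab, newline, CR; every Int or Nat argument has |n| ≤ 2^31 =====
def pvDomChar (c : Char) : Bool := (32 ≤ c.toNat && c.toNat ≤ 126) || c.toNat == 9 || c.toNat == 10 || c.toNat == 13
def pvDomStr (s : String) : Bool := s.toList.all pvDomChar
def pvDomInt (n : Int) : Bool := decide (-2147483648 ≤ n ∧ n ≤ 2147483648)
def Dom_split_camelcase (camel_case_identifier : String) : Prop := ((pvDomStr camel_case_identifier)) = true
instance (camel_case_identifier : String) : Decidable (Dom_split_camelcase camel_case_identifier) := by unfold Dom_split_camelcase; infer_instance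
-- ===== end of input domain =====

-- B replaces A's single-pass flag automaton by a two-pass run decomposition (classify into
-- maximal category runs, then emit tokens with the acronym rule); objective: alternative.

-- ===== PORT A =====
-- state: (result, current, prev_upper, prev_digit, prev_special)
def pvStepA : (List (List Char) × List Char × Bool × Bool × Bool) → Char →
    (List (List Char) × List Char × Bool × Bool × Bool)
  | (result, current, prev_upper, prev_digit, prev_special), c =>
    let upper := PySem.Chars.isupper c
    let digit := PySem.Chars.isdigit c
    let special := !(PySem.Chars.isalnum c)
    if (digit && !prev_digit) || (upper && !prev_upper) || (special && !prev_special) then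
      (result ++ [current], [c], upper, digit, special)
    else if !upper && prev_upper && decide (1 < current.length) then
      -- current[:-1] and current[-1]; the guard 1 < |current| makes pyGet? exact (some _)
      (result ++ [PySem.List.slice current none (some (-1))],
       ((PySem.List.pyGet? current (-1)).getD c) :: [c], upper, digit, special)
    else if !digit && prev_digit then
      (result ++ [current], [c], upper, digit, special)
    else if !special && prev_special then
      (result ++ [current], [c], upper, digit, special)
    else
      (result, current ++ [c], upper, digit, special)

def split_camelcase (camel_case_identifier : String) : List String :=
  match camel_case_identifier.toList with
  | [] => []
  | c0 :: rest =>
    ((rest.foldl pvStepA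
        ([], [c0], PySem.Chars.isupper c0, PySem.Chars.isdigit c0, !(PySem.Chars.isalnum c0))).1 ++
     [(rest.foldl pvStepA
        ([], [c0], PySem.Chars.isupper c0, PySem.Chars.isdigit c0, !(PySem.Chars.isalnum c0))).2.1]).map
      String.ofList

-- ===== PORT B =====
-- character category: 0 = upper, 1 = digit, 2 = special (not alnum), 3 = lower/other alnum
def pvCat (c : Char) : Nat :=
  if PySem.Chars.isupper c then 0
  else if PySem.Chars.isdigit c then 1
  else if !(PySem.Chars.isalnum c) then 2
  else 3

-- pass 1 step: extend the last run or start a new one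
def pvAddRun (runs : List (Nat × List Char)) (c : Char) : List (Nat × List Char) :=
  match runs.getLast? with
  | some kt => if kt.1 = pvCat c then runs.dropLast ++ [(kt.1, kt.2 ++ [c])]
               else runs ++ [(pvCat c, [c])]
  | none => [(pvCat c, [c])]

-- pass 2: emit tokens; an upper run directly before a lower run merges (length 1)
-- or donates its last character (length > 1)
def pvEmit : List (Nat × List Char) → List (List Char)
  | [] => []
  | [(_, t)] => [t]
  | (k, t) :: (k2, low) :: rest2 =>
    if k = 0 ∧ k2 = 3 then
      if t.length = 1 then (t ++ low) :: pvEmit rest2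
      else (PySem.List.slice t none (some (-1))) ::
           (((PySem.List.pyGet? t (-1)).getD ' ') :: low) :: pvEmit rest2
    else t :: pvEmit ((k2, low) :: rest2)

def split_camelcase_alt (camel_case_identifier : String) : List String :=
  (pvEmit (camel_case_identifier.toList.foldl pvAddRun [])).map String.ofList

-- ===== PRECONDITION & SPEC =====
def Spec_split_camelcase (camel_case_identifier : String) (out : List String) : Prop := out = split_camelcase_alt camel_case_identifier
instance (camel_case_identifier : String) (out : List String) : Decidable (Spec_split_camelcase camel_case_identifier out) := by unfold Spec_split_camelcase; infer_instance

-- ===== CLAIM (what is proved, stated in full; the proofs are below) =====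
def Claim_equal_split_camelcase : Prop := ∀ (camel_case_identifier : String), Dom_split_camelcase camel_case_identifier → Spec_split_camelcase camel_case_identifier (split_camelcase camel_case_identifier)

-- ===== LEMMAS AND PROOFS =====

-- category facts
theorem pvCat_lt_four (c : Char) : pvCat c < 4 := by
  unfold pvCat; split_ifs <;> omega

theorem pv_upper_not_digit (c : Char) (h : PySem.Chars.isupper c = true) :
    PySem.Chars.isdigit c = false := by
  simp only [PySem.Chars.isupper, Bool.and_eq_true, decide_eq_true_eq] at h
  simp only [PySem.Chars.isdigit, Bool.and_eq_false_iff, decide_eq_false_iff_not]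
  right
  intro h9
  exact absurd (le_trans h.1 h9) (by decide)

theorem pvUpper_eq (c : Char) : PySem.Chars.isupper c = (pvCat c == 0) := by
  unfold pvCat
  cases h : PySem.Chars.isupper c
  · simp only [h, Bool.false_eq_true, if_false]
    split_ifs <;> simp
  · simp [h]

theorem pvDigit_eq (c : Char) : PySem.Chars.isdigit c = (pvCat c == 1) := by
  unfold pvCat
  cases hu : PySem.Chars.isupper c
  · simp only [Bool.false_eq_true, if_false]
    cases hd : PySem.Chars.isdigit c
    · simp only [hd, Bool.false_eq_true, if_false]
      split_ifs <;> simp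
    · simp [hd]
  · simp [pv_upper_not_digit c hu]

theorem pvSpecial_eq (c : Char) : (!(PySem.Chars.isalnum c)) = (pvCat c == 2) := by
  unfold pvCat
  cases hu : PySem.Chars.isupper c
  · cases hd : PySem.Chars.isdigit c
    · simp only [Bool.false_eq_true, if_false]
      cases ha : PySem.Chars.isalnum c
      · simp [ha]
      · simp [ha]
    · simp [PySem.Chars.isalnum, hd]
  · simp [PySem.Chars.isalnum, PySem.Chars.isalpha, hu]

-- right-to-left run decomposition (proof-side spec)
def pvConsRun (k : Nat) (t : List Char) (rs : List (Nat × List Char)) : List (Nat × List Char) :=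
  match rs with
  | (k', t') :: rest => if k' = k then (k, t ++ t') :: rest else (k, t) :: (k', t') :: rest
  | [] => [(k, t)]

def pvRuns : List Char → List (Nat × List Char)
  | [] => []
  | c :: cs => pvConsRun (pvCat c) [c] (pvRuns cs)

def pvSplit (k : Nat) (rs : List (Nat × List Char)) : List Char × List (Nat × List Char) :=
  match rs with
  | (k', t') :: rest => if k' = k then (t', rest) else ([], (k', t') :: rest)
  | [] => ([], [])

theorem pvConsRun_eq (k : Nat) (t : List Char) (rs : List (Nat × List Char)) :
    pvConsRun k t rs = (k, t ++ (pvSplit k rs).1) :: (pvSplit k rs).2 := by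
  cases rs with
  | nil => simp [pvConsRun, pvSplit]
  | cons p rest =>
    obtain ⟨k', t'⟩ := p
    simp only [pvConsRun, pvSplit]
    split_ifs <;> simp

theorem pvConsRun_same (k : Nat) (t : List Char) (c : Char) (rs : List (Nat × List Char)) :
    pvConsRun k t (pvConsRun k [c] rs) = pvConsRun k (t ++ [c]) rs := by
  cases rs with
  | nil => simp [pvConsRun]
  | cons p rest =>
    obtain ⟨k', t'⟩ := p
    by_cases h : k' = k <;> simp [pvConsRun, h]

theorem pvConsRun_ne (k k' : Nat) (h : k' ≠ k) (t : List Char) (c : Char)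
    (rs : List (Nat × List Char)) :
    pvConsRun k t (pvConsRun k' [c] rs) = (k, t) :: pvConsRun k' [c] rs := by
  rw [pvConsRun_eq k' [c] rs]
  simp [pvConsRun, h]

-- B's pass 1 computes pvRuns
theorem pvFoldB (cs : List Char) : ∀ (rs : List (Nat × List Char)) (k : Nat) (t : List Char),
    List.foldl pvAddRun (rs ++ [(k, t)]) cs = rs ++ pvConsRun k t (pvRuns cs) := by
  induction cs with
  | nil => intro rs k t; simp [pvRuns, pvConsRun]
  | cons c cs ih =>
    intro rs k t
    simp only [List.foldl_cons, pvAddRun, List.getLast?_concat, List.dropLast_concat]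
    by_cases h : k = pvCat c
    · rw [if_pos h]
      rw [ih]
      simp [pvRuns, ← h, pvConsRun_same]
    · rw [if_neg h]
      rw [List.append_assoc, ← List.append_assoc rs, ih (rs ++ [(k, t)])]
      simp [pvRuns, pvConsRun_ne _ _ (fun h' => h h'.symm), List.append_assoc]

theorem pvRuns_of_foldl (cs : List Char) : List.foldl pvAddRun [] cs = pvRuns cs := by
  cases cs with
  | nil => rfl
  | cons c cs =>
    have h0 : pvAddRun [] c = [(pvCat c, [c])] := by simp [pvAddRun]
    simp only [List.foldl_cons, h0]
    have h := pvFoldB cs [] (pvCat c) [c]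
    simpa [pvRuns] using h

-- emit helpers
theorem pvEmit_cons_ne_zero (k : Nat) (hk : k ≠ 0) (t : List Char)
    (r : List (Nat × List Char)) : pvEmit ((k, t) :: r) = t :: pvEmit r := by
  match r with
  | [] => rfl
  | (k2, l) :: r2 =>
    simp only [pvEmit]
    rw [if_neg (fun h => hk h.1)]

theorem pvGetD_irrel (t : List Char) (h : t ≠ []) (a b : Char) :
    (PySem.List.pyGet? t (-1)).getD a = (PySem.List.pyGet? t (-1)).getD b := by
  match t with
  | x :: xs => simp [PySem.List.pyGet?, PySem.List.pyIdx?]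

-- A's loop, from a state whose flags encode category k, appends pvEmit of the pending
-- run consed onto the runs of the remaining input
theorem pvLoopA (cs : List Char) : ∀ (result : List (List Char)) (t : List Char) (k : Nat),
    t ≠ [] → k < 4 →
    (List.foldl pvStepA (result, t, (k == 0 : Bool), (k == 1 : Bool), (k == 2 : Bool)) cs).1 ++
      [(List.foldl pvStepA (result, t, (k == 0 : Bool), (k == 1 : Bool), (k == 2 : Bool)) cs).2.1] =
    result ++ pvEmit (pvConsRun k t (pvRuns cs)) := by
  induction cs with
  | nil =>
    intro result t k ht hk
    simp [pvRuns, pvConsRun, pvEmit]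
  | cons c cs ih =>
    intro result t k ht hk
    have hc4 := pvCat_lt_four c
    have hks : k = 0 ∨ k = 1 ∨ k = 2 ∨ k = 3 := by omega
    have hcs : pvCat c = 0 ∨ pvCat c = 1 ∨ pvCat c = 2 ∨ pvCat c = 3 := by omega
    simp only [List.foldl_cons, pvStepA, pvUpper_eq, pvDigit_eq, pvSpecial_eq, pvRuns]
    rcases hcs with hc | hc | hc | hc <;> rcases hks with hk0 | hk0 | hk0 | hk0 <;>
      subst hk0 <;> rw [hc] <;>
      simp only [Nat.reduceBEq, beq_self_eq_true, Bool.not_true, Bool.not_false,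
        Bool.true_and, Bool.false_and, Bool.and_true, Bool.and_false, Bool.and_self,
        Bool.or_true, Bool.or_false, Bool.or_self,
        if_true, if_false, Bool.false_eq_true]
    -- 16 cases in order (pvCat c, k) = (0,0),(0,1),(0,2),(0,3),(1,0),(1,1),…,(3,3)
    case inl.inl =>  -- (0,0) same category
      exact (ih result (t ++ [c]) 0 (by simp) (by omega)).trans
        (by rw [pvConsRun_same])
    case inl.inr.inl =>  -- c upper, k = 1
      exact (ih (result ++ [t]) [c] 0 (by simp) (by omega)).trans
        (by
          rw [pvConsRun_ne 1 0 (by decide) t c (pvRuns cs), pvConsRun_eq 0 [c] (pvRuns cs)]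
          simp only [pvEmit]
          rw [if_neg (by decide), ← pvConsRun_eq]
          simp)
    case inl.inr.inr.inl =>  -- c upper, k = 2
      exact (ih (result ++ [t]) [c] 0 (by simp) (by omega)).trans
        (by
          rw [pvConsRun_ne 2 0 (by decide) t c (pvRuns cs), pvConsRun_eq 0 [c] (pvRuns cs)]
          simp only [pvEmit]
          rw [if_neg (by decide), ← pvConsRun_eq]
          simp)
    case inl.inr.inr.inr =>  -- c upper, k = 3
      exact (ih (result ++ [t]) [c] 0 (by simp) (by omega)).trans
        (by
          rw [pvConsRun_ne 3 0 (by decide) t c (pvRuns cs), pvConsRun_eq 0 [c] (pvRuns cs)]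
          simp only [pvEmit]
          rw [if_neg (by decide), ← pvConsRun_eq]
          simp)
    case inr.inl.inl =>  -- c digit, k = 0
      exact (ih (result ++ [t]) [c] 1 (by simp) (by omega)).trans
        (by
          rw [pvConsRun_ne 0 1 (by decide) t c (pvRuns cs), pvConsRun_eq 1 [c] (pvRuns cs)]
          simp only [pvEmit]
          rw [if_neg (by decide), ← pvConsRun_eq]
          simp)
    case inr.inl.inr.inl =>  -- (1,1) same category
      exact (ih result (t ++ [c]) 1 (by simp) (by omega)).trans
        (by rw [pvConsRun_same])
    case inr.inl.inr.inr.inl =>  -- c digit, k = 2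
      exact (ih (result ++ [t]) [c] 1 (by simp) (by omega)).trans
        (by
          rw [pvConsRun_ne 2 1 (by decide) t c (pvRuns cs), pvConsRun_eq 1 [c] (pvRuns cs)]
          simp only [pvEmit]
          rw [if_neg (by decide), ← pvConsRun_eq]
          simp)
    case inr.inl.inr.inr.inr =>  -- c digit, k = 3
      exact (ih (result ++ [t]) [c] 1 (by simp) (by omega)).trans
        (by
          rw [pvConsRun_ne 3 1 (by decide) t c (pvRuns cs), pvConsRun_eq 1 [c] (pvRuns cs)]
          simp only [pvEmit]
          rw [if_neg (by decide), ← pvConsRun_eq]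
          simp)
    case inr.inr.inl.inl =>  -- c special, k = 0
      exact (ih (result ++ [t]) [c] 2 (by simp) (by omega)).trans
        (by
          rw [pvConsRun_ne 0 2 (by decide) t c (pvRuns cs), pvConsRun_eq 2 [c] (pvRuns cs)]
          simp only [pvEmit]
          rw [if_neg (by decide), ← pvConsRun_eq]
          simp)
    case inr.inr.inl.inr.inl =>  -- c special, k = 1
      exact (ih (result ++ [t]) [c] 2 (by simp) (by omega)).trans
        (by
          rw [pvConsRun_ne 1 2 (by decide) t c (pvRuns cs), pvConsRun_eq 2 [c] (pvRuns cs)]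
          simp only [pvEmit]
          rw [if_neg (by decide), ← pvConsRun_eq]
          simp)
    case inr.inr.inl.inr.inr.inl =>  -- (2,2) same category
      exact (ih result (t ++ [c]) 2 (by simp) (by omega)).trans
        (by rw [pvConsRun_same])
    case inr.inr.inl.inr.inr.inr =>  -- c special, k = 3
      exact (ih (result ++ [t]) [c] 2 (by simp) (by omega)).trans
        (by
          rw [pvConsRun_ne 3 2 (by decide) t c (pvRuns cs), pvConsRun_eq 2 [c] (pvRuns cs)]
          simp only [pvEmit]
          rw [if_neg (by decide), ← pvConsRun_eq]
          simp)
    case inr.inr.inr.inl =>  -- c lower, k = 0: acronym rule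
      by_cases hlen : 1 < t.length
      · rw [if_pos (by simpa using hlen)]
        exact (ih (result ++ [PySem.List.slice t none (some (-1))])
            ([(PySem.List.pyGet? t (-1)).getD c, c]) 3 (by simp) (by omega)).trans
          (by
            rw [pvConsRun_ne 0 3 (by decide) t c (pvRuns cs),
                pvConsRun_eq 3 [c] (pvRuns cs),
                pvConsRun_eq 3 ([(PySem.List.pyGet? t (-1)).getD c, c]) (pvRuns cs)]
            rw [pvEmit_cons_ne_zero 3 (by decide)]
            simp only [pvEmit]
            rw [if_pos (by simp), if_neg (by omega)]
            rw [pvGetD_irrel t ht c ' ']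
            simp)
      · rw [if_neg (by simpa using hlen)]
        have ht1 : t.length = 1 := by
          cases t with
          | nil => exact absurd rfl ht
          | cons x xs => simp at hlen ⊢; omega
        exact (ih result (t ++ [c]) 3 (by simp) (by omega)).trans
          (by
            rw [pvConsRun_ne 0 3 (by decide) t c (pvRuns cs),
                pvConsRun_eq 3 [c] (pvRuns cs),
                pvConsRun_eq 3 (t ++ [c]) (pvRuns cs)]
            rw [pvEmit_cons_ne_zero 3 (by decide)]
            simp only [pvEmit]
            rw [if_pos (by simp), if_pos ht1]
            simp)
    case inr.inr.inr.inr.inl =>  -- c lower, k = 1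
      exact (ih (result ++ [t]) [c] 3 (by simp) (by omega)).trans
        (by
          rw [pvConsRun_ne 1 3 (by decide) t c (pvRuns cs), pvConsRun_eq 3 [c] (pvRuns cs)]
          simp only [pvEmit]
          rw [if_neg (by decide), ← pvConsRun_eq]
          simp)
    case inr.inr.inr.inr.inr.inl =>  -- c lower, k = 2
      exact (ih (result ++ [t]) [c] 3 (by simp) (by omega)).trans
        (by
          rw [pvConsRun_ne 2 3 (by decide) t c (pvRuns cs), pvConsRun_eq 3 [c] (pvRuns cs)]
          simp only [pvEmit]
          rw [if_neg (by decide), ← pvConsRun_eq]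
          simp)
    case inr.inr.inr.inr.inr.inr =>  -- (3,3) same category
      exact (ih result (t ++ [c]) 3 (by simp) (by omega)).trans
        (by rw [pvConsRun_same])

-- ===== VERDICT (by name: the statement is the Claim_ definition above) =====
theorem split_camelcase_spec : Claim_equal_split_camelcase := by
  intro s _
  unfold Spec_split_camelcase split_camelcase split_camelcase_alt
  rw [pvRuns_of_foldl]
  cases h : s.toList with
  | nil => rfl
  | cons c0 rest =>
    simp only [pvUpper_eq, pvDigit_eq, pvSpecial_eq]
    rw [pvLoopA rest [] [c0] (pvCat c0) (by simp) (pvCat_lt_four c0)]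
    simp [pvRuns]
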